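-- pv_equiv track=rewrite | github.com/zoongahn/problem-solving-BOJ | until20231107/10816.number_card_2.py | search
-- ===== SOURCE A (Python) =====
-- def search(my_list, n):
--     start, end = 0, len(my_list) - 1
--     while start <= end:
--         med = (start + end) // 2
--         if n == my_list[med][0]:
--             return my_list[med][1]
--         elif n < my_list[med][0]:
--             end = med - 1
--         else:
--             start = med + 1
--     return 0
-- ===== SOURCE B (Python) =====
-- def search(my_list, n):
--     def go(start, count):
--         if count == 0:
--             return 0
--         off = (count - 1) // 2
--         key, val = my_list[start + off]
--         if n == key:
--             return val
--         if n < key: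
--             return go(start, off)
--         return go(start + off + 1, count - off - 1)
--     return go(0, len(my_list))
-- ===== Notes on version B (the rewrite author's own statement) =====
-- stated objective: alternative
-- what changed: Replaces A's iterative while loop over mutable inclusive (start, end) index bounds with a recursive helper over a (start offset, window length) pair: base case length 0, probe my_list[start + (count-1)//2], recurse on the left or right sub-window; the probed indices coincide with A's, so the results agree everywhere.
import Mathlib
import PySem

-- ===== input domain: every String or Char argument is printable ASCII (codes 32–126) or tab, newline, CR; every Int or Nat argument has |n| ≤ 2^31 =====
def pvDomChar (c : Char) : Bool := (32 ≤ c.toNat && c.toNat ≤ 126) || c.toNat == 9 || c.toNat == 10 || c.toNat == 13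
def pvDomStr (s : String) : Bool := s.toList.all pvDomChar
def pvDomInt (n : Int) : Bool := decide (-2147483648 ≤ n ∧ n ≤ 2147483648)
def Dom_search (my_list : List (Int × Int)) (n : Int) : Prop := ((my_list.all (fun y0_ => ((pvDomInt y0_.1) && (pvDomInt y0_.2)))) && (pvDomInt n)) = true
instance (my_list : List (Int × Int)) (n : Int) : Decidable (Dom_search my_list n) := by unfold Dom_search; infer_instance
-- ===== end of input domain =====

-- B replaces A's while loop over mutable inclusive (start, end) Int bounds by a recursive helper
-- over a (start offset, window length) pair; same probe sequence, same result; objective: alternative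
-- decomposition, same asymptotic cost.

-- ===== PORT A =====
-- A's while loop over mutable (start, end), as the obvious tail recursion on that state.
-- `fuel` is only a totality guard: the loop shrinks e + 1 - start, so fuel = length + 1 never runs out.
def searchGo (my_list : List (Int × Int)) (n : Int) (fuel : Nat) (start e : Int) : Int :=
  match fuel with
  | 0 => 0
  | fuel + 1 =>
    if start ≤ e then
      let med := PySem.Int.floordiv (start + e) 2
      match PySem.List.pyGet? my_list med with
      | none => 0            -- IndexError; unreachable from `search` (0 ≤ med < length there)
      | some p =>
        if n = p.1 then p.2
        else if n < p.1 then searchGo my_list n fuel start (med - 1)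
        else searchGo my_list n fuel (med + 1) e
    else 0

def search (my_list : List (Int × Int)) (n : Int) : Int :=
  searchGo my_list n (my_list.length + 1) 0 (my_list.length - 1)

-- ===== PORT B =====
-- B's helper `go(start, count)`: structural recursion on the window length `count` (a Nat),
-- so no fuel is needed; Python's (count - 1) // 2 with count = c + 1 ≥ 1 is Nat division c / 2.
def searchAltGo (my_list : List (Int × Int)) (n : Int) : Nat → Nat → Int
  | _, 0 => 0
  | start, c + 1 =>
    let off := c / 2
    match PySem.List.pyGet? my_list ((start + off : Nat) : Int) with
    | none => 0              -- IndexError; unreachable from `search_alt` (start + off < length there)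
    | some p =>
      if n = p.1 then p.2
      else if n < p.1 then searchAltGo my_list n start off
      else searchAltGo my_list n (start + off + 1) (c - off)
  termination_by _ count => count
  decreasing_by all_goals omega

def search_alt (my_list : List (Int × Int)) (n : Int) : Int :=
  searchAltGo my_list n 0 my_list.length

-- ===== PRECONDITION & SPEC =====
def Spec_search (my_list : List (Int × Int)) (n : Int) (out : Int) : Prop := out = search_alt my_list n
instance (my_list : List (Int × Int)) (n : Int) (out : Int) : Decidable (Spec_search my_list n out) := by unfold Spec_search; infer_instance

-- ===== CLAIM (what is proved, stated in full; the proofs are below) =====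
def Claim_equal_search : Prop := ∀ (my_list : List (Int × Int)) (n : Int), Dom_search my_list n → Spec_search my_list n (search my_list n)

-- ===== LEMMAS AND PROOFS =====

theorem go_eq (L : List (Int × Int)) (n : Int) :
    ∀ (fuel : Nat) (s e : Int), (e + 1 - s).toNat < fuel → 0 ≤ s → e < (L.length : Int) →
      searchGo L n fuel s e = searchAltGo L n s.toNat (e + 1 - s).toNat := by
  intro fuel
  induction fuel with
  | zero => intro s e hk; omega
  | succ k ih =>
    intro s e hk hs he
    by_cases hse : s ≤ e
    · have hmedE : PySem.Int.floordiv (s + e) 2 = (s + e) / 2 :=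
        PySem.Int.floordiv_eq_ediv_of_pos (by omega)
      set med := PySem.Int.floordiv (s + e) 2 with hmeddef
      have hmb : s ≤ med ∧ med ≤ e := by rw [hmedE]; omega
      obtain ⟨c, hc⟩ : ∃ c, (e + 1 - s).toNat = c + 1 := ⟨(e - s).toNat, by omega⟩
      have hcval : (c : Int) = e - s := by omega
      have hoff : ((c / 2 : Nat) : Int) = med - s := by
        rw [hmedE]; omega
      have hidx : ((s.toNat + c / 2 : Nat) : Int) = med := by
        push_cast [hoff]; omega
      rw [searchGo, if_pos hse, hc, searchAltGo]
      simp only [← hmeddef, hidx]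
      cases hget : PySem.List.pyGet? L med with
      | none => rfl
      | some p =>
        dsimp only
        split_ifs with h1 h2
        · rfl
        · -- left half: window (s, med - 1); length off = c / 2
          have := ih s (med - 1) (by omega) hs (by omega)
          rw [this]
          have : (med - 1 + 1 - s).toNat = c / 2 := by omega
          rw [this]
        · -- right half: window (med + 1, e); start index s.toNat + c/2 + 1, length c - c/2
          have := ih (med + 1) e (by omega) (by omega) he
          rw [this]
          have h1' : (med + 1).toNat = s.toNat + c / 2 + 1 := by omega
          have h2' : (e + 1 - (med + 1)).toNat = c - c / 2 := by omega
          rw [h1', h2']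
    · have hk0 : (e + 1 - s).toNat = 0 := by omega
      rw [searchGo, if_neg hse, hk0, searchAltGo]

-- ===== VERDICT (by name: the statement is the Claim_ definition above) =====
theorem search_spec : Claim_equal_search := by
  intro L n _
  unfold Spec_search search search_alt
  have h := go_eq L n (L.length + 1) 0 ((L.length : Int) - 1) (by omega) (by omega) (by omega)
  simpa using h
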